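-- pv_equiv track=rewrite | github.com/daniel-reich/ubiquitous-fiesta | hQRuQguN4bKyM2gik_22.py | simple_check
-- ===== SOURCE A (Python) =====
-- def simple_check(a, b):
--   count = 0
--   while a > 0 and b > 0:
--     if max([a, b]) % min([a, b]) == 0:
--       count += 1
--
--     a -= 1
--     b -= 1
--
--   return count
-- ===== SOURCE B (Python) =====
-- def simple_check(a, b):
--     # Count k in 1..min(a,b) dividing |a-b|, via divisor pairs up to sqrt(|a-b|).
--     m = min(a, b)
--     if m <= 0:
--         return 0
--     d = abs(a - b)
--     if d == 0:
--         return m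
--     count = 0
--     i = 1
--     while i * i <= d:
--         if d % i == 0:
--             if i <= m:
--                 count += 1
--             j = d // i
--             if j != i and j <= m:
--                 count += 1
--         i += 1
--     return count
-- ===== Notes on version B (the rewrite author's own statement) =====
-- stated objective: faster
-- what changed: A simulates every decrement step (O(min(a,b)) iterations); B observes that the step condition is 'current min divides |a-b|' and instead counts divisors of |a-b| that are <= min(a,b) by enumerating divisor pairs up to sqrt(|a-b|), special-casing a==b.
import Mathlib
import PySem

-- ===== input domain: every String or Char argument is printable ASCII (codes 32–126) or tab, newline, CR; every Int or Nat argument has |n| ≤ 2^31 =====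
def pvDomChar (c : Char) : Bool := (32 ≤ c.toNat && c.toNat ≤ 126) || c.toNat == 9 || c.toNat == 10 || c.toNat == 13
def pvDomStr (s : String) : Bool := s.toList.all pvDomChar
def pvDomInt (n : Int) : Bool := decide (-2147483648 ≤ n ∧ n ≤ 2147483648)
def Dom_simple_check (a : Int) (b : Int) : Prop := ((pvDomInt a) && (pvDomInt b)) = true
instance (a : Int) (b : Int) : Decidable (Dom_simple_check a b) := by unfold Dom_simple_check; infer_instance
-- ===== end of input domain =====

-- B replaces A's step-by-step decrement simulation by counting the divisors of |a-b|
-- that are ≤ min(a,b) via divisor pairs up to √|a-b| (objective: faster).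

-- ===== PORT A =====
-- the while loop of A: decrement both until one hits 0, counting steps where min divides max
def simpleLoopA (a b count : Int) : Int :=
  if h : 0 < a ∧ 0 < b then
    simpleLoopA (a - 1) (b - 1)
      (if PySem.Int.mod (max a b) (min a b) = 0 then count + 1 else count)
  else count
termination_by a.toNat
decreasing_by omega

def simple_check (a : Int) (b : Int) : Int := simpleLoopA a b 0

-- ===== PORT B =====
-- the while loop of B: enumerate divisor pairs (i, d//i) for i*i ≤ d
def altDivLoop (d m i count : Int) : Int :=
  if h : i * i ≤ d then
    altDivLoop d m (i + 1)
      (if PySem.Int.mod d i = 0 then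
        (let count1 := if i ≤ m then count + 1 else count
         let j := PySem.Int.floordiv d i
         if j ≠ i ∧ j ≤ m then count1 + 1 else count1)
       else count)
  else count
termination_by (d + 1 - i).toNat
decreasing_by
  have hii : i ≤ i * i := by nlinarith
  omega

def simple_check_alt (a : Int) (b : Int) : Int :=
  let m := min a b
  if m ≤ 0 then 0
  else
    let d := |a - b|
    if d = 0 then m
    else altDivLoop d m 1 0

-- ===== PRECONDITION & SPEC =====
def Spec_simple_check (a : Int) (b : Int) (out : Int) : Prop := out = simple_check_alt a b
instance (a : Int) (b : Int) (out : Int) : Decidable (Spec_simple_check a b out) := by unfold Spec_simple_check; infer_instance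

-- ===== CLAIM (what is proved, stated in full; the proofs are below) =====
def Claim_equal_simple_check : Prop := ∀ (a : Int) (b : Int), Dom_simple_check a b → Spec_simple_check a b (simple_check a b)

-- ===== LEMMAS AND PROOFS =====

-- the common mathematical value: number of k in [1, m] dividing d
noncomputable def divSet (d m : Int) : Finset Int :=
  (Finset.Icc 1 m).filter (fun k => d % k = 0)

theorem divSet_nonpos (d m : Int) (hm : m ≤ 0) : divSet d m = ∅ := by
  unfold divSet
  rw [Finset.Icc_eq_empty (by omega), Finset.filter_empty]

theorem divSet_succ (d m : Int) (hm : 1 ≤ m) :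
    (divSet d m).card = (divSet d (m - 1)).card + (if d % m = 0 then 1 else 0) := by
  have hins : Finset.Icc (1:Int) m = insert m (Finset.Icc 1 (m-1)) := by
    ext k; simp [Finset.mem_Icc, Finset.mem_insert]; omega
  have hnm : m ∉ divSet d (m-1) := by
    unfold divSet; simp [Finset.mem_Icc]
  unfold divSet
  rw [hins, Finset.filter_insert]
  split_ifs with h
  · exact Finset.card_insert_of_notMem hnm
  · rfl

-- members of divSet divide d and lie in [1, d]
theorem divSet_mem (d m k : Int) (hd : 0 < d) (hk : k ∈ divSet d m) :
    1 ≤ k ∧ k ≤ m ∧ k ∣ d ∧ k ≤ d ∧ 1 ≤ d / k ∧ k * (d / k) = d := by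
  unfold divSet at hk
  simp [Finset.mem_Icc] at hk
  obtain ⟨⟨h1, h2⟩, h3⟩ := hk
  have hdvd : k ∣ d := h3
  have hkd : k ≤ d := Int.le_of_dvd hd hdvd
  have hmul : k * (d / k) = d := Int.mul_ediv_cancel' hdvd
  have hq : 1 ≤ d / k := by
    rw [Int.le_ediv_iff_mul_le (by omega)]; omega
  exact ⟨h1, h2, hdvd, hkd, hq, hmul⟩

-- loop invariant for A's loop
theorem simpleLoopA_eq (n : Nat) : ∀ (a b c : Int), (min a b).toNat = n →
    simpleLoopA a b c = c + ((divSet (|a - b|) (min a b)).card : Int) := by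
  induction n with
  | zero =>
    intro a b c hn
    have hm : min a b ≤ 0 := by omega
    rw [simpleLoopA]
    rw [dif_neg (by omega)]
    rw [divSet_nonpos _ _ hm]
    simp
  | succ n ih =>
    intro a b c hn
    have hm : 1 ≤ min a b := by omega
    have ha : 0 < a := by omega
    have hb : 0 < b := by omega
    rw [simpleLoopA, dif_pos ⟨ha, hb⟩]
    have hmin : min (a-1) (b-1) = min a b - 1 := by omega
    have habs : |a - 1 - (b - 1)| = |a - b| := by congr 1; ring
    rw [ih (a-1) (b-1) _ (by omega), hmin, habs]
    have hcond : PySem.Int.mod (max a b) (min a b) = 0 ↔ |a - b| % (min a b) = 0 := by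
      rw [PySem.Int.mod_eq_emod_of_pos (by omega)]
      have hmax : max a b = min a b + |a - b| := by
        rcases le_total a b with h | h
        · rw [abs_of_nonpos (by omega)]; omega
        · rw [abs_of_nonneg (by omega)]; omega
      rw [hmax, Int.add_emod_left]
    rw [divSet_succ _ _ hm]
    by_cases h : |a - b| % (min a b) = 0
    · rw [if_pos (hcond.mpr h), if_pos h]; push_cast; ring
    · rw [if_neg (fun hc => h (hcond.mp hc)), if_neg h]; push_cast; ring

-- loop invariant for B's loop: it counts the members of divSet whose pair-minimum is still ≥ i
theorem noDiv_beyond_sqrt (d m i : Int) (hd : 0 < d) (hi : 1 ≤ i) (hgt : ¬ i * i ≤ d) :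
    (divSet d m).filter (fun k => i ≤ min k (d / k)) = ∅ := by
  apply Finset.filter_eq_empty_iff.mpr
  intro k hk hik
  obtain ⟨h1, _, _, _, hq, hmul⟩ := divSet_mem d m k hd hk
  have hik1 : i ≤ k := le_trans hik (min_le_left _ _)
  have hik2 : i ≤ d / k := le_trans hik (min_le_right _ _)
  have : i * i ≤ k * (d / k) := mul_le_mul hik1 hik2 (by omega) (by omega)
  omega

-- the members of divSet handled at step i are exactly i and d/i (when i divides d)
theorem memE_iff (d m i k : Int) (hd : 0 < d) (hi : 1 ≤ i) (hii : i * i ≤ d) (hmod : d % i = 0) :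
    k ∈ (divSet d m).filter (fun k => min k (d / k) = i) ↔
      ((k = i ∧ i ≤ m) ∨ (k = d / i ∧ d / i ≠ i ∧ d / i ≤ m)) := by
  have hdvd : i ∣ d := Int.dvd_of_emod_eq_zero hmod
  have hj : i * (d / i) = d := Int.mul_ediv_cancel' hdvd
  have hij : i ≤ d / i := le_of_mul_le_mul_left (show i * i ≤ i * (d / i) by rw [hj]; exact hii) (by omega)
  constructor
  · intro hk
    rw [Finset.mem_filter] at hk
    obtain ⟨hks, hkmin⟩ := hk
    obtain ⟨h1, h2, hkdvd, hkd, hq, hkmul⟩ := divSet_mem d m k hd hks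
    rcases le_total k (d / k) with hle | hle
    · have hki : k = i := by rw [min_eq_left hle] at hkmin; exact hkmin
      exact Or.inl ⟨hki, by omega⟩
    · have hdk : d / k = i := by rw [min_eq_right hle] at hkmin; exact hkmin
      have hkj : k = d / i := by
        have hki : d = k * i := by rw [← hdk]; exact hkmul.symm
        exact (Int.ediv_eq_of_eq_mul_left (by omega) hki).symm
      by_cases hji : d / i = i
      · exact Or.inl ⟨by omega, by omega⟩
      · exact Or.inr ⟨hkj, hji, by omega⟩
  · intro hk
    rcases hk with ⟨hki, him⟩ | ⟨hkj, hji, hjm⟩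
    · subst hki
      rw [Finset.mem_filter]
      refine ⟨?_, by rw [min_eq_left hij]⟩
      unfold divSet; rw [Finset.mem_filter, Finset.mem_Icc]
      exact ⟨⟨hi, him⟩, hmod⟩
    · subst hkj
      have hjdvd : (d / i) ∣ d := ⟨i, by rw [mul_comm]; exact hj.symm⟩
      have hdj : d / (d / i) = i := by
        exact Int.ediv_eq_of_eq_mul_left (by omega) hj.symm
      rw [Finset.mem_filter]
      refine ⟨?_, by rw [hdj, min_eq_right hij]⟩
      unfold divSet; rw [Finset.mem_filter, Finset.mem_Icc]
      exact ⟨⟨by omega, hjm⟩, Int.emod_emod_of_dvd d hjdvd ▸ Int.emod_emod_of_dvd d hjdvd ▸ Int.emod_eq_zero_of_dvd hjdvd⟩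

-- how many members are handled at step i
theorem pairStep (d m i : Int) (hd : 0 < d) (hi : 1 ≤ i) (hii : i * i ≤ d) :
    (((divSet d m).filter (fun k => min k (d / k) = i)).card : Int)
      = if d % i = 0 then
          (if i ≤ m then 1 else 0) + (if d / i ≠ i ∧ d / i ≤ m then 1 else 0)
        else 0 := by
  by_cases hmod : d % i = 0
  · rw [if_pos hmod]
    have hdvd : i ∣ d := Int.dvd_of_emod_eq_zero hmod
    have hj : i * (d / i) = d := Int.mul_ediv_cancel' hdvd
    have hij : i ≤ d / i := le_of_mul_le_mul_left (show i * i ≤ i * (d / i) by rw [hj]; exact hii) (by omega)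
    by_cases him : i ≤ m <;> by_cases hjm : d / i ≠ i ∧ d / i ≤ m
    · have : (divSet d m).filter (fun k => min k (d / k) = i) = {i, d / i} := by
        ext k
        rw [memE_iff d m i k hd hi hii hmod, Finset.mem_insert, Finset.mem_singleton]
        constructor
        · rintro (⟨h, _⟩ | ⟨h, _, _⟩) <;> simp [h]
        · rintro (h | h)
          · exact Or.inl ⟨h, him⟩
          · exact Or.inr ⟨h, hjm⟩
      rw [this, if_pos him, if_pos hjm, Finset.card_pair (by exact fun h => hjm.1 h.symm)]
      norm_num
    · have : (divSet d m).filter (fun k => min k (d / k) = i) = {i} := by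
        ext k
        rw [memE_iff d m i k hd hi hii hmod, Finset.mem_singleton]
        constructor
        · rintro (⟨h, _⟩ | ⟨h, hj1, hj2⟩)
          · exact h
          · exact absurd ⟨hj1, hj2⟩ hjm
        · intro h; exact Or.inl ⟨h, him⟩
      rw [this, if_pos him, if_neg hjm, Finset.card_singleton]
      norm_num
    · have : (divSet d m).filter (fun k => min k (d / k) = i) = {d / i} := by
        ext k
        rw [memE_iff d m i k hd hi hii hmod, Finset.mem_singleton]
        constructor
        · rintro (⟨h, h2⟩ | ⟨h, _, _⟩)
          · exact absurd h2 him
          · exact h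
        · intro h; exact Or.inr ⟨h, hjm⟩
      rw [this, if_neg him, if_pos hjm, Finset.card_singleton]
      norm_num
    · have : (divSet d m).filter (fun k => min k (d / k) = i) = ∅ := by
        ext k
        rw [memE_iff d m i k hd hi hii hmod]
        simp only [Finset.notMem_empty, iff_false]
        rintro (⟨_, h2⟩ | ⟨_, hj1, hj2⟩)
        · exact him h2
        · exact hjm ⟨hj1, hj2⟩
      rw [this, if_neg him, if_neg hjm, Finset.card_empty]
      simp
  · rw [if_neg hmod]
    have : (divSet d m).filter (fun k => min k (d / k) = i) = ∅ := by
      apply Finset.filter_eq_empty_iff.mpr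
      intro k hk hkmin
      obtain ⟨h1, h2, hkdvd, hkd, hq, hkmul⟩ := divSet_mem d m k hd hk
      apply hmod
      rcases le_total k (d / k) with hle | hle
      · have : k = i := by rw [min_eq_left hle] at hkmin; exact hkmin
        rw [← this]; exact Int.emod_eq_zero_of_dvd hkdvd
      · have hdk : d / k = i := by rw [min_eq_right hle] at hkmin; exact hkmin
        have hdvd2 : i ∣ d := ⟨k, by rw [← hdk, mul_comm]; exact hkmul.symm⟩
        exact Int.emod_eq_zero_of_dvd hdvd2
    rw [this, Finset.card_empty]
    simp

theorem altDivLoop_eq (d m : Int) (hd : 0 < d) (n : Nat) : ∀ (i c : Int), 1 ≤ i → (d + 1 - i).toNat = n →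
    altDivLoop d m i c = c + (((divSet d m).filter (fun k => i ≤ min k (d / k))).card : Int) := by
  induction n with
  | zero =>
    intro i c hi hn
    have hgt : ¬ (i * i ≤ d) := by
      have h1 : d + 1 ≤ i := by omega
      nlinarith
    rw [altDivLoop, dif_neg hgt, noDiv_beyond_sqrt d m i hd hi hgt]
    simp
  | succ n ih =>
    intro i c hi hn
    by_cases hle : i * i ≤ d
    · have hii : i ≤ i * i := by nlinarith
      rw [altDivLoop, dif_pos hle]
      rw [ih (i + 1) _ (by omega) (by omega)]
      have hdisj : Disjoint ((divSet d m).filter (fun k => i + 1 ≤ min k (d / k)))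
          ((divSet d m).filter (fun k => min k (d / k) = i)) := by
        apply Finset.disjoint_left.mpr
        intro k hk1 hk2
        rw [Finset.mem_filter] at hk1 hk2
        omega
      have hsplit : (divSet d m).filter (fun k => i ≤ min k (d / k)) =
          ((divSet d m).filter (fun k => i + 1 ≤ min k (d / k))) ∪
          ((divSet d m).filter (fun k => min k (d / k) = i)) := by
        rw [← Finset.filter_or]
        apply Finset.filter_congr
        intro k _
        omega
      rw [hsplit, Finset.card_union_of_disjoint hdisj]
      rw [PySem.Int.mod_eq_emod_of_pos (by omega), PySem.Int.floordiv_eq_ediv_of_pos (by omega)]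
      push_cast
      rw [pairStep d m i hd hi hle]
      split_ifs <;> push_cast <;> ring
    · rw [altDivLoop, dif_neg hle, noDiv_beyond_sqrt d m i hd hi hle]
      simp

-- count all k in 1..m dividing d
theorem altDivLoop_full (d m : Int) (hd : 0 < d) :
    altDivLoop d m 1 0 = ((divSet d m).card : Int) := by
  rw [altDivLoop_eq d m hd (d + 1 - 1).toNat 1 0 le_rfl rfl]
  have : (divSet d m).filter (fun k => 1 ≤ min k (d / k)) = divSet d m := by
    apply Finset.filter_eq_self.mpr
    intro k hk
    obtain ⟨h1, _, _, _, hq, _⟩ := divSet_mem d m k hd hk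
    omega
  rw [this]; simp

theorem divSet_zero (m : Int) (hm : 0 ≤ m) : ((divSet 0 m).card : Int) = m := by
  have : divSet 0 m = Finset.Icc 1 m := by
    unfold divSet
    apply Finset.filter_eq_self.mpr
    intro k hk
    simp [Finset.mem_Icc] at hk
    simp
  rw [this, Int.card_Icc]
  omega

-- ===== VERDICT (by name: the statement is the Claim_ definition above) =====
theorem simple_check_spec : Claim_equal_simple_check := by
  intro a b _
  show simple_check a b = simple_check_alt a b
  unfold simple_check simple_check_alt
  rw [simpleLoopA_eq (min a b).toNat a b 0 rfl]
  by_cases hm : min a b ≤ 0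
  · rw [if_pos hm, divSet_nonpos _ _ hm]; simp
  · rw [if_neg hm]
    by_cases hd : |a - b| = 0
    · rw [if_pos hd, hd, divSet_zero _ (by omega)]; simp
    · rw [if_neg hd, altDivLoop_full _ _ (by positivity)]
      simp
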